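-- pv_equiv track=rewrite | github.com/kayden173800/kayden173800.github.io | passwordstrength.tester/pw_analyzer_gui.py | recommendations_from_issues
-- ===== SOURCE A (Python) =====
-- def recommendations_from_issues(issues):
--     recs = []
--     if not issues:
--         recs.append("Looks good. Consider using a passphrase for additional strength.")
--     else:
--         if any("Too short" in i for i in issues):
--             recs.append("Increase length — length adds entropy faster than extra complexity.")
--         if any("Common password" in i for i in issues):
--             recs.append("Avoid common words/passwords. Use uncommon words or a passphrase.")
--         if any("No uppercase" in i or "No lowercase" in i for i in issues):
--             recs.append("Mix uppercase and lowercase letters (or use multiple words).")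
--         if any("No digits" in i for i in issues):
--             recs.append("Add digits or use separators in a passphrase.")
--         if any("No symbols" in i for i in issues):
--             recs.append("Add symbols or punctuation to increase variety.")
--         if any("repeated" in i.lower() for i in issues):
--             recs.append("Avoid repeated characters or predictable sequences.")
--     return recs
-- ===== SOURCE B (Python) =====
-- def recommendations_from_issues(issues):
--     if not issues:
--         return ["Looks good. Consider using a passphrase for additional strength."]
--     short = common = case = digits = symbols = repeated = False
--     for i in issues:
--         short = short or "Too short" in i
--         common = common or "Common password" in i
--         case = case or "No uppercase" in i or "No lowercase" in i
--         digits = digits or "No digits" in i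
--         symbols = symbols or "No symbols" in i
--         repeated = repeated or "repeated" in i.lower()
--     recs = []
--     if short:
--         recs.append("Increase length — length adds entropy faster than extra complexity.")
--     if common:
--         recs.append("Avoid common words/passwords. Use uncommon words or a passphrase.")
--     if case:
--         recs.append("Mix uppercase and lowercase letters (or use multiple words).")
--     if digits:
--         recs.append("Add digits or use separators in a passphrase.")
--     if symbols:
--         recs.append("Add symbols or punctuation to increase variety.")
--     if repeated:
--         recs.append("Avoid repeated characters or predictable sequences.")
--     return recs
-- ===== Notes on version B (the rewrite author's own statement) =====
-- stated objective: alternative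
-- what changed: B replaces A's six separate any(...) scans over the issue list with a single pass that accumulates six boolean flags, then emits the recommendations in the fixed order from the flags.
import Mathlib
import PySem

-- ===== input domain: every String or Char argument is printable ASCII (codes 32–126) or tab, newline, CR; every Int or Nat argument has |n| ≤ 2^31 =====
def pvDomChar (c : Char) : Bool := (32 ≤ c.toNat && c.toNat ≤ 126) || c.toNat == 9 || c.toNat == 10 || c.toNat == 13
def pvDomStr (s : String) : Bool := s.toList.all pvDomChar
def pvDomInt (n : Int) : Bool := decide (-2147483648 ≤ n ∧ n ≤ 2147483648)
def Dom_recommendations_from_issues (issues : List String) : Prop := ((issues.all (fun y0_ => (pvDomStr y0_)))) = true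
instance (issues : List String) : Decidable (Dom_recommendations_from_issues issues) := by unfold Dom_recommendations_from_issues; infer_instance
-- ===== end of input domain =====

-- B does one pass over the issues, accumulating six flags, instead of A's six any(...) scans; same output.

-- ===== PORT A =====
def recommendations_from_issues (issues : List String) : List String :=
  let recs : List String := []
  if issues = [] then
    recs ++ ["Looks good. Consider using a passphrase for additional strength."]
  else
    let recs := if issues.any (fun i => PySem.Str.isIn "Too short" i) then
      recs ++ ["Increase length — length adds entropy faster than extra complexity."] else recs
    let recs := if issues.any (fun i => PySem.Str.isIn "Common password" i) then
      recs ++ ["Avoid common words/passwords. Use uncommon words or a passphrase."] else recs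
    let recs := if issues.any (fun i => PySem.Str.isIn "No uppercase" i || PySem.Str.isIn "No lowercase" i) then
      recs ++ ["Mix uppercase and lowercase letters (or use multiple words)."] else recs
    let recs := if issues.any (fun i => PySem.Str.isIn "No digits" i) then
      recs ++ ["Add digits or use separators in a passphrase."] else recs
    let recs := if issues.any (fun i => PySem.Str.isIn "No symbols" i) then
      recs ++ ["Add symbols or punctuation to increase variety."] else recs
    let recs := if issues.any (fun i => PySem.Str.isIn "repeated" (PySem.Str.lower i)) then
      recs ++ ["Avoid repeated characters or predictable sequences."] else recs
    recs

-- ===== PORT B =====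
def recommendations_from_issues_alt (issues : List String) : List String :=
  if issues = [] then
    ["Looks good. Consider using a passphrase for additional strength."]
  else
    let fl := issues.foldl
      (fun (f : Bool × Bool × Bool × Bool × Bool × Bool) i =>
        (f.1 || PySem.Str.isIn "Too short" i,
         f.2.1 || PySem.Str.isIn "Common password" i,
         f.2.2.1 || PySem.Str.isIn "No uppercase" i || PySem.Str.isIn "No lowercase" i,
         f.2.2.2.1 || PySem.Str.isIn "No digits" i,
         f.2.2.2.2.1 || PySem.Str.isIn "No symbols" i,
         f.2.2.2.2.2 || PySem.Str.isIn "repeated" (PySem.Str.lower i)))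
      (false, false, false, false, false, false)
    (if fl.1 then ["Increase length — length adds entropy faster than extra complexity."] else []) ++
    (if fl.2.1 then ["Avoid common words/passwords. Use uncommon words or a passphrase."] else []) ++
    (if fl.2.2.1 then ["Mix uppercase and lowercase letters (or use multiple words)."] else []) ++
    (if fl.2.2.2.1 then ["Add digits or use separators in a passphrase."] else []) ++
    (if fl.2.2.2.2.1 then ["Add symbols or punctuation to increase variety."] else []) ++
    (if fl.2.2.2.2.2 then ["Avoid repeated characters or predictable sequences."] else [])

-- ===== PRECONDITION & SPEC =====
def Spec_recommendations_from_issues (issues : List String) (out : List String) : Prop := out = recommendations_from_issues_alt issues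
instance (issues : List String) (out : List String) : Decidable (Spec_recommendations_from_issues issues out) := by unfold Spec_recommendations_from_issues; infer_instance

-- ===== CLAIM (what is proved, stated in full; the proofs are below) =====
def Claim_equal_recommendations_from_issues : Prop := ∀ (issues : List String), Dom_recommendations_from_issues issues → Spec_recommendations_from_issues issues (recommendations_from_issues issues)

-- ===== LEMMAS AND PROOFS =====

/-- The six-flag fold equals, componentwise, the OR of the start flags with `any` of each test. -/
theorem pv_foldl_flags (l : List String) (f : Bool × Bool × Bool × Bool × Bool × Bool) :
    l.foldl (fun (f : Bool × Bool × Bool × Bool × Bool × Bool) i =>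
        (f.1 || PySem.Str.isIn "Too short" i,
         f.2.1 || PySem.Str.isIn "Common password" i,
         f.2.2.1 || PySem.Str.isIn "No uppercase" i || PySem.Str.isIn "No lowercase" i,
         f.2.2.2.1 || PySem.Str.isIn "No digits" i,
         f.2.2.2.2.1 || PySem.Str.isIn "No symbols" i,
         f.2.2.2.2.2 || PySem.Str.isIn "repeated" (PySem.Str.lower i))) f
      = (f.1 || l.any (fun i => PySem.Str.isIn "Too short" i),
         f.2.1 || l.any (fun i => PySem.Str.isIn "Common password" i),
         f.2.2.1 || l.any (fun i => PySem.Str.isIn "No uppercase" i || PySem.Str.isIn "No lowercase" i),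
         f.2.2.2.1 || l.any (fun i => PySem.Str.isIn "No digits" i),
         f.2.2.2.2.1 || l.any (fun i => PySem.Str.isIn "No symbols" i),
         f.2.2.2.2.2 || l.any (fun i => PySem.Str.isIn "repeated" (PySem.Str.lower i))) := by
  induction l generalizing f with
  | nil => simp
  | cons a t ih => rw [List.foldl_cons, ih]; simp [Bool.or_assoc]

/-- A's reassignment chain of appends equals B's concatenation of guarded singletons. -/
theorem pv_chain (c1 c2 c3 c4 c5 c6 : Bool) :
    (let recs : List String := []
     let recs := if c1 then recs ++ ["Increase length — length adds entropy faster than extra complexity."] else recs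
     let recs := if c2 then recs ++ ["Avoid common words/passwords. Use uncommon words or a passphrase."] else recs
     let recs := if c3 then recs ++ ["Mix uppercase and lowercase letters (or use multiple words)."] else recs
     let recs := if c4 then recs ++ ["Add digits or use separators in a passphrase."] else recs
     let recs := if c5 then recs ++ ["Add symbols or punctuation to increase variety."] else recs
     let recs := if c6 then recs ++ ["Avoid repeated characters or predictable sequences."] else recs
     recs)
    = (if c1 then ["Increase length — length adds entropy faster than extra complexity."] else []) ++
      (if c2 then ["Avoid common words/passwords. Use uncommon words or a passphrase."] else []) ++
      (if c3 then ["Mix uppercase and lowercase letters (or use multiple words)."] else []) ++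
      (if c4 then ["Add digits or use separators in a passphrase."] else []) ++
      (if c5 then ["Add symbols or punctuation to increase variety."] else []) ++
      (if c6 then ["Avoid repeated characters or predictable sequences."] else []) := by
  cases c1 <;> cases c2 <;> cases c3 <;> cases c4 <;> cases c5 <;> cases c6 <;> rfl

theorem pv_cons_case (a : String) (t : List String) :
    recommendations_from_issues (a :: t) = recommendations_from_issues_alt (a :: t) := by
  unfold recommendations_from_issues recommendations_from_issues_alt
  rw [if_neg (List.cons_ne_nil a t), if_neg (List.cons_ne_nil a t), pv_foldl_flags]
  simp only [Bool.false_or]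
  exact pv_chain _ _ _ _ _ _

-- ===== VERDICT (by name: the statement is the Claim_ definition above) =====
theorem recommendations_from_issues_spec : Claim_equal_recommendations_from_issues := by
  intro issues _
  unfold Spec_recommendations_from_issues
  cases issues with
  | nil => rfl
  | cons a t => exact pv_cons_case a t
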